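-- pv_equiv track=rewrite | github.com/angsh-d/envois_poc | app/agents/registry_agent.py | _generate_proximity_recommendation
-- ===== SOURCE A (Python) =====
-- from typing import Any, Dict, List, Optional
--
-- def _generate_proximity_recommendation(
--
--     warnings: List[Dict[str, Any]]
-- ) -> str:
--     """Generate actionable recommendation based on proximity warnings."""
--     if not warnings:
--         return "All monitored metrics are within acceptable ranges. Continue routine surveillance."
--
--     exceeded_risk = [w for w in warnings if w["warning_level"] == "EXCEEDED_RISK"]
--     near_risk = [w for w in warnings if w["warning_level"] == "NEAR_RISK"]
--     exceeded_concern = [w for w in warnings if w["warning_level"] == "EXCEEDED_CONCERN"]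
--     near_concern = [w for w in warnings if w["warning_level"] == "NEAR_CONCERN"]
--
--     if exceeded_risk:
--         return (
--             f"URGENT: {len(exceeded_risk)} metric(s) exceed risk thresholds. "
--             f"Immediate review of patient outcomes and surgical technique required. "
--             f"Consider notifying regulatory bodies if trend continues."
--         )
--     elif near_risk:
--         return (
--             f"WARNING: {len(near_risk)} metric(s) approaching risk thresholds. "
--             f"Increase monitoring frequency and investigate contributing factors. "
--             f"Prepare mitigation plan if metric continues trending."
--         )
--     elif exceeded_concern:
--         return (
--             f"ATTENTION: {len(exceeded_concern)} metric(s) exceed concern thresholds. "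
--             f"Review recent cases for patterns. Consider root cause analysis."
--         )
--     elif near_concern:
--         return (
--             f"NOTE: {len(near_concern)} metric(s) approaching concern thresholds. "
--             f"Continue monitoring. Flag for discussion in next quality review."
--         )
--
--     return "Metrics require attention. Review detailed warnings above."
-- ===== SOURCE B (Python) =====
-- from typing import Any, Dict, List, Optional
--
-- _PRIORITY = {"EXCEEDED_RISK": 4, "NEAR_RISK": 3, "EXCEEDED_CONCERN": 2, "NEAR_CONCERN": 1}
--
-- def _generate_proximity_recommendation(
--     warnings: List[Dict[str, Any]]
-- ) -> str:
--     """Single pass tracking the highest-severity level seen and how many warnings carry it."""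
--     if not warnings:
--         return "All monitored metrics are within acceptable ranges. Continue routine surveillance."
--
--     best = 0
--     count = 0
--     for w in warnings:
--         r = _PRIORITY.get(w["warning_level"], 0)
--         if r > best:
--             best, count = r, 1
--         elif r == best:
--             count += 1
--
--     if best == 4:
--         return (
--             f"URGENT: {count} metric(s) exceed risk thresholds. "
--             f"Immediate review of patient outcomes and surgical technique required. "
--             f"Consider notifying regulatory bodies if trend continues."
--         )
--     if best == 3:
--         return (
--             f"WARNING: {count} metric(s) approaching risk thresholds. "
--             f"Increase monitoring frequency and investigate contributing factors. "
--             f"Prepare mitigation plan if metric continues trending."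
--         )
--     if best == 2:
--         return (
--             f"ATTENTION: {count} metric(s) exceed concern thresholds. "
--             f"Review recent cases for patterns. Consider root cause analysis."
--         )
--     if best == 1:
--         return (
--             f"NOTE: {count} metric(s) approaching concern thresholds. "
--             f"Continue monitoring. Flag for discussion in next quality review."
--         )
--     return "Metrics require attention. Review detailed warnings above."
-- ===== Notes on version B (the rewrite author's own statement) =====
-- stated objective: alternative
-- what changed: B replaces A's four independent filtered-list scans and if/elif ladder over the lists by one running-maximum pass that tracks only the highest-priority level seen so far and the count of warnings at that level, then dispatches on the numeric rank.
import Mathlib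
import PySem

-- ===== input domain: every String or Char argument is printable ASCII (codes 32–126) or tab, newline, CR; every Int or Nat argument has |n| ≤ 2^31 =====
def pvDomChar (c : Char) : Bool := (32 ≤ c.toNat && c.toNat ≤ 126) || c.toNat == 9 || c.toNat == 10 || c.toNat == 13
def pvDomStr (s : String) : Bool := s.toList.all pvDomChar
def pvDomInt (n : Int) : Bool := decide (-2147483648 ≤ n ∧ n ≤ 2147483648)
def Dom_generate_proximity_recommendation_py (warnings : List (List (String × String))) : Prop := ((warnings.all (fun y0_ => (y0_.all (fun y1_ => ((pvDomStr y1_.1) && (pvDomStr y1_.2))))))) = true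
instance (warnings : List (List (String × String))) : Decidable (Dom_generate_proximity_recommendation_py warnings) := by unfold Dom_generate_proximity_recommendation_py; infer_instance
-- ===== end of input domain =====

-- B replaces A's four filtered-list scans by one running-maximum pass tracking only the
-- highest-priority level seen and the count of warnings at that level.

-- ===== PORT A =====
-- w["warning_level"] : first-match lookup in the association list (KeyError = key absent, excluded by Pre_)
def pvLevel (w : List (String × String)) : String := (List.lookup "warning_level" w).getD ""

def generate_proximity_recommendation_py (warnings : List (List (String × String))) : String :=
  if warnings = [] then
    "All monitored metrics are within acceptable ranges. Continue routine surveillance."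
  else
    let exceeded_risk := warnings.filter (fun w => pvLevel w == "EXCEEDED_RISK")
    let near_risk := warnings.filter (fun w => pvLevel w == "NEAR_RISK")
    let exceeded_concern := warnings.filter (fun w => pvLevel w == "EXCEEDED_CONCERN")
    let near_concern := warnings.filter (fun w => pvLevel w == "NEAR_CONCERN")
    if exceeded_risk ≠ [] then
      "URGENT: " ++ PySem.Int.toStr (exceeded_risk.length : Int) ++ " metric(s) exceed risk thresholds. Immediate review of patient outcomes and surgical technique required. Consider notifying regulatory bodies if trend continues."
    else if near_risk ≠ [] then
      "WARNING: " ++ PySem.Int.toStr (near_risk.length : Int) ++ " metric(s) approaching risk thresholds. Increase monitoring frequency and investigate contributing factors. Prepare mitigation plan if metric continues trending."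
    else if exceeded_concern ≠ [] then
      "ATTENTION: " ++ PySem.Int.toStr (exceeded_concern.length : Int) ++ " metric(s) exceed concern thresholds. Review recent cases for patterns. Consider root cause analysis."
    else if near_concern ≠ [] then
      "NOTE: " ++ PySem.Int.toStr (near_concern.length : Int) ++ " metric(s) approaching concern thresholds. Continue monitoring. Flag for discussion in next quality review."
    else
      "Metrics require attention. Review detailed warnings above."

-- ===== PORT B =====
-- the module-level _PRIORITY dict literal
def pvPriority : PySem.Dict String Int :=
  PySem.Dict.mk [("EXCEEDED_RISK", 4), ("NEAR_RISK", 3), ("EXCEEDED_CONCERN", 2), ("NEAR_CONCERN", 1)]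

-- _PRIORITY.get(w["warning_level"], 0)
def pvRank (w : List (String × String)) : Int :=
  pvPriority.getD ((List.lookup "warning_level" w).getD "") 0

def generate_proximity_recommendation_py_alt (warnings : List (List (String × String))) : String :=
  if warnings = [] then
    "All monitored metrics are within acceptable ranges. Continue routine surveillance."
  else
    let s := warnings.foldl
      (fun (bc : Int × Int) (w : List (String × String)) =>
        let r := pvRank w
        if r > bc.1 then (r, 1) else if r = bc.1 then (bc.1, bc.2 + 1) else bc)
      ((0 : Int), (0 : Int))
    if s.1 = 4 then
      "URGENT: " ++ PySem.Int.toStr s.2 ++ " metric(s) exceed risk thresholds. Immediate review of patient outcomes and surgical technique required. Consider notifying regulatory bodies if trend continues."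
    else if s.1 = 3 then
      "WARNING: " ++ PySem.Int.toStr s.2 ++ " metric(s) approaching risk thresholds. Increase monitoring frequency and investigate contributing factors. Prepare mitigation plan if metric continues trending."
    else if s.1 = 2 then
      "ATTENTION: " ++ PySem.Int.toStr s.2 ++ " metric(s) exceed concern thresholds. Review recent cases for patterns. Consider root cause analysis."
    else if s.1 = 1 then
      "NOTE: " ++ PySem.Int.toStr s.2 ++ " metric(s) approaching concern thresholds. Continue monitoring. Flag for discussion in next quality review."
    else
      "Metrics require attention. Review detailed warnings above."

-- ===== PRECONDITION & SPEC =====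
-- Pre_ excludes warnings containing a dict without the "warning_level" key: there both
-- Pythons (A and B alike) raise KeyError and return no value.
def Pre_generate_proximity_recommendation_py (warnings : List (List (String × String))) : Prop :=
  warnings.all (fun w => w.any (fun p => p.1 == "warning_level")) = true
instance (warnings : List (List (String × String))) : Decidable (Pre_generate_proximity_recommendation_py warnings) := by unfold Pre_generate_proximity_recommendation_py; infer_instance

def pvWitness_generate_proximity_recommendation_py : (List (List (String × String))) :=
  [[("warning_level", "NEAR_RISK")], [("warning_level", "EXCEEDED_CONCERN")]]

def Spec_generate_proximity_recommendation_py (warnings : List (List (String × String))) (out : String) : Prop := out = generate_proximity_recommendation_py_alt warnings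
instance (warnings : List (List (String × String))) (out : String) : Decidable (Spec_generate_proximity_recommendation_py warnings out) := by unfold Spec_generate_proximity_recommendation_py; infer_instance

-- ===== CLAIM =====
def Claim_equal_generate_proximity_recommendation_py : Prop := ∀ (warnings : List (List (String × String))), Dom_generate_proximity_recommendation_py warnings → Pre_generate_proximity_recommendation_py warnings → Spec_generate_proximity_recommendation_py warnings (generate_proximity_recommendation_py warnings)

-- ===== LEMMAS AND PROOFS =====

-- the maximum rank occurring in the list (0 if none), the proof-side characterisation of B's 'best'
def pvM (l : List (List (String × String))) : Int := (l.map pvRank).foldl max 0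

-- pvRank as an explicit priority ladder on the level string
theorem pvRank_cases (w : List (String × String)) :
    pvRank w = (if pvLevel w = "EXCEEDED_RISK" then 4 else if pvLevel w = "NEAR_RISK" then 3
      else if pvLevel w = "EXCEEDED_CONCERN" then 2 else if pvLevel w = "NEAR_CONCERN" then 1 else 0) := by
  show pvPriority.getD (pvLevel w) 0 = _
  generalize pvLevel w = s
  simp only [pvPriority, PySem.Dict.getD, PySem.Dict.get?_mk_cons, beq_iff_eq]
  by_cases h1 : s = "EXCEEDED_RISK" <;> by_cases h2 : s = "NEAR_RISK" <;>
    by_cases h3 : s = "EXCEEDED_CONCERN" <;> by_cases h4 : s = "NEAR_CONCERN" <;>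
    simp_all [eq_comm, PySem.Dict.get?]

theorem pvRank_le (w : List (String × String)) : pvRank w ≤ 4 := by
  rw [pvRank_cases]; split_ifs <;> norm_num

theorem pvRank_eq_iff (w : List (String × String)) (k : Int) (L : String)
    (hk : (k = 4 ∧ L = "EXCEEDED_RISK") ∨ (k = 3 ∧ L = "NEAR_RISK") ∨
          (k = 2 ∧ L = "EXCEEDED_CONCERN") ∨ (k = 1 ∧ L = "NEAR_CONCERN")) :
    (pvRank w = k ↔ pvLevel w = L) := by
  rw [pvRank_cases]
  rcases hk with ⟨rfl, rfl⟩ | ⟨rfl, rfl⟩ | ⟨rfl, rfl⟩ | ⟨rfl, rfl⟩ <;>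
    split_ifs <;> simp_all

theorem pvM_nonneg (l : List (List (String × String))) : 0 ≤ pvM l :=
  (PySem.List.le_foldl_max (l.map pvRank) 0).1

theorem pvRank_le_pvM (l : List (List (String × String))) (w : List (String × String)) (hw : w ∈ l) :
    pvRank w ≤ pvM l :=
  (PySem.List.le_foldl_max (l.map pvRank) 0).2 _ (List.mem_map_of_mem hw)

theorem pvM_mem (l : List (List (String × String))) :
    pvM l = 0 ∨ ∃ w ∈ l, pvRank w = pvM l := by
  induction l using List.reverseRecOn with
  | nil => left; rfl
  | append_singleton t a ih =>
    have hM : pvM (t ++ [a]) = max (pvM t) (pvRank a) := by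
      simp [pvM, List.foldl_append]
    rcases le_or_gt (pvRank a) (pvM t) with h | h
    · rw [hM, max_eq_left h]
      rcases ih with h0 | ⟨w, hw, hr⟩
      · left; exact h0
      · right; exact ⟨w, by simp [hw], hr⟩
    · right
      rw [hM, max_eq_right h.le]
      exact ⟨a, by simp, rfl⟩

theorem pvM_le (l : List (List (String × String))) : pvM l ≤ 4 := by
  rcases pvM_mem l with h | ⟨w, _, hw⟩
  · omega
  · rw [← hw]; exact pvRank_le w

-- B's fold computes (max rank, count of warnings attaining it)
theorem pvFold_eq (l : List (List (String × String))) :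
    l.foldl
      (fun (bc : Int × Int) (w : List (String × String)) =>
        let r := pvRank w
        if r > bc.1 then (r, 1) else if r = bc.1 then (bc.1, bc.2 + 1) else bc)
      ((0 : Int), (0 : Int))
    = (pvM l, (l.countP (fun w => pvRank w == pvM l) : Int)) := by
  induction l using List.reverseRecOn with
  | nil => simp [pvM]
  | append_singleton t a ih =>
    have hM : pvM (t ++ [a]) = max (pvM t) (pvRank a) := by
      simp [pvM, List.foldl_append]
    rw [List.foldl_append, ih, List.foldl_cons, List.foldl_nil]
    simp only [gt_iff_lt]
    rcases lt_trichotomy (pvM t) (pvRank a) with h | h | h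
    · have hM' : pvM (t ++ [a]) = pvRank a := by rw [hM, max_eq_right h.le]
      have hz : t.countP (fun w => pvRank w == pvM (t ++ [a])) = 0 := by
        rw [List.countP_eq_zero]
        intro w hw
        have := pvRank_le_pvM t w hw
        simp only [beq_iff_eq]; omega
      rw [if_pos h, Prod.ext_iff]
      refine ⟨hM'.symm, ?_⟩
      rw [List.countP_append, hz, List.countP_cons, List.countP_nil]
      simp [hM']
    · have hM' : pvM (t ++ [a]) = pvM t := by rw [hM, max_eq_left h.ge]
      rw [if_neg (by omega), if_pos h.symm, Prod.ext_iff]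
      refine ⟨hM'.symm, ?_⟩
      rw [List.countP_append, List.countP_cons, List.countP_nil, hM']
      simp [← h]
    · have hM' : pvM (t ++ [a]) = pvM t := by rw [hM, max_eq_left h.le]
      rw [if_neg (by omega), if_neg (by omega), Prod.ext_iff]
      refine ⟨hM'.symm, ?_⟩
      rw [List.countP_append, List.countP_cons, List.countP_nil, hM']
      have : (pvRank a == pvM t) = false := by simp only [beq_eq_false_iff_ne]; omega
      simp [this]

-- ===== VERDICT =====
set_option maxHeartbeats 1000000 in
theorem generate_proximity_recommendation_py_spec : Claim_equal_generate_proximity_recommendation_py := by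
  intro l _ _
  unfold Spec_generate_proximity_recommendation_py
  unfold generate_proximity_recommendation_py generate_proximity_recommendation_py_alt
  by_cases hnil : l = []
  · simp [hnil]
  · simp only [hnil, if_false, ne_eq]
    rw [pvFold_eq]
    have hfe : ∀ (k : Int) (L : String),
        ((k = 4 ∧ L = "EXCEEDED_RISK") ∨ (k = 3 ∧ L = "NEAR_RISK") ∨
         (k = 2 ∧ L = "EXCEEDED_CONCERN") ∨ (k = 1 ∧ L = "NEAR_CONCERN")) →
        (l.filter (fun w => pvLevel w == L) ≠ [] ↔ ∃ w ∈ l, pvRank w = k) := by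
      intro k L hk
      have hbase : l.filter (fun w => pvLevel w == L) ≠ [] ↔ ∃ w ∈ l, pvLevel w = L := by simp
      rw [hbase]
      constructor
      · rintro ⟨w, hw, hl⟩; exact ⟨w, hw, (pvRank_eq_iff w k L hk).2 hl⟩
      · rintro ⟨w, hw, hr⟩; exact ⟨w, hw, (pvRank_eq_iff w k L hk).1 hr⟩
    have hcnt : ∀ (k : Int) (L : String),
        ((k = 4 ∧ L = "EXCEEDED_RISK") ∨ (k = 3 ∧ L = "NEAR_RISK") ∨
         (k = 2 ∧ L = "EXCEEDED_CONCERN") ∨ (k = 1 ∧ L = "NEAR_CONCERN")) →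
        (l.filter (fun w => pvLevel w == L)).length = l.countP (fun w => pvRank w == k) := by
      intro k L hk
      rw [← List.countP_eq_length_filter]
      exact List.countP_congr (fun w _ => by
        rw [Bool.eq_iff_iff]
        simp [pvRank_eq_iff w k L hk])
    have h0 := pvM_nonneg l
    have h4 := pvM_le l
    have hmem := pvM_mem l
    have hup : ∀ (k : Int) (L : String),
        ((k = 4 ∧ L = "EXCEEDED_RISK") ∨ (k = 3 ∧ L = "NEAR_RISK") ∨
         (k = 2 ∧ L = "EXCEEDED_CONCERN") ∨ (k = 1 ∧ L = "NEAR_CONCERN")) →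
        (l.filter (fun w => pvLevel w == L) ≠ [] → k ≤ pvM l) := by
      intro k L hk h
      obtain ⟨w, hw, hr⟩ := (hfe k L hk).1 h
      exact hr ▸ pvRank_le_pvM l w hw
    by_cases hER : l.filter (fun w => pvLevel w == "EXCEEDED_RISK") ≠ []
    · have hM : pvM l = 4 := le_antisymm h4 (hup 4 _ (by tauto) hER)
      rw [if_pos hER, if_pos hM, hcnt 4 _ (by tauto), hM]
    · rw [if_neg hER]
      have hM4 : pvM l ≠ 4 := fun h => hER <| (hfe 4 _ (by tauto)).2 <| by
        rcases hmem with h' | ⟨w, hw, hr⟩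
        · omega
        · exact ⟨w, hw, by omega⟩
      by_cases hNR : l.filter (fun w => pvLevel w == "NEAR_RISK") ≠ []
      · have hM : pvM l = 3 := by have := hup 3 _ (by tauto) hNR; omega
        rw [if_pos hNR, if_neg (by omega), if_pos hM, hcnt 3 _ (by tauto), hM]
      · rw [if_neg hNR]
        have hM3 : pvM l ≠ 3 := fun h => hNR <| (hfe 3 _ (by tauto)).2 <| by
          rcases hmem with h' | ⟨w, hw, hr⟩
          · omega
          · exact ⟨w, hw, by omega⟩
        by_cases hEC : l.filter (fun w => pvLevel w == "EXCEEDED_CONCERN") ≠ []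
        · have hM : pvM l = 2 := by have := hup 2 _ (by tauto) hEC; omega
          rw [if_pos hEC, if_neg (by omega), if_neg (by omega), if_pos hM, hcnt 2 _ (by tauto), hM]
        · rw [if_neg hEC]
          have hM2 : pvM l ≠ 2 := fun h => hEC <| (hfe 2 _ (by tauto)).2 <| by
            rcases hmem with h' | ⟨w, hw, hr⟩
            · omega
            · exact ⟨w, hw, by omega⟩
          by_cases hNC : l.filter (fun w => pvLevel w == "NEAR_CONCERN") ≠ []
          · have hM : pvM l = 1 := by have := hup 1 _ (by tauto) hNC; omega
            rw [if_pos hNC, if_neg (by omega), if_neg (by omega), if_neg (by omega), if_pos hM,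
              hcnt 1 _ (by tauto), hM]
          · rw [if_neg hNC]
            have hM1 : pvM l ≠ 1 := fun h => hNC <| (hfe 1 _ (by tauto)).2 <| by
              rcases hmem with h' | ⟨w, hw, hr⟩
              · omega
              · exact ⟨w, hw, by omega⟩
            rw [if_neg (by omega), if_neg (by omega), if_neg (by omega), if_neg (by omega)]
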